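-- pv_equiv track=rewrite | github.com/7max18/Advent-of-Code | 2022/Day17PyroclasticFlowP2.py | SmoothCheck
-- ===== SOURCE A (Python) =====
-- def SmoothCheck(chamber, start):
--     check = [False, False, False, False, False, False, False]
--     for row in chamber[start:]:
--         if row[0] == 1:
--             r = range(len(row))
--             for i in r:
--                 if row[i] == 1:
--                     check[i] = True
--                 else:
--                     break
--         if row[len(row) - 1] == 1:
--             r = reversed(range(len(row)))
--             for i in r:
--                 if row[i] == 1:
--                     check[i] = True
--                 else:
--                     break
--     for c in check:
--         if not c:
--             return False
--     else:
--         return True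
-- ===== SOURCE B (Python) =====
-- def SmoothCheck(chamber, start):
--     # Column-major check: column j (0..6) is smooth-covered iff some row's
--     # all-ones prefix reaches j or some row's all-ones suffix starts at or before j.
--     rows = chamber[start:]
--     return all(
--         any(j < len(row)
--             and (all(x == 1 for x in row[:j + 1]) or all(x == 1 for x in row[j:]))
--             for row in rows)
--         for j in range(7))
-- ===== Notes on version B (the rewrite author's own statement) =====
-- stated objective: simpler
-- what changed: Replaces the mutable 7-flag array updated by per-row leading/trailing marking loops with break by a single column-major all/any expression: column j is covered iff some row has an all-ones prefix through j or an all-ones suffix from j.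
import Mathlib
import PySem

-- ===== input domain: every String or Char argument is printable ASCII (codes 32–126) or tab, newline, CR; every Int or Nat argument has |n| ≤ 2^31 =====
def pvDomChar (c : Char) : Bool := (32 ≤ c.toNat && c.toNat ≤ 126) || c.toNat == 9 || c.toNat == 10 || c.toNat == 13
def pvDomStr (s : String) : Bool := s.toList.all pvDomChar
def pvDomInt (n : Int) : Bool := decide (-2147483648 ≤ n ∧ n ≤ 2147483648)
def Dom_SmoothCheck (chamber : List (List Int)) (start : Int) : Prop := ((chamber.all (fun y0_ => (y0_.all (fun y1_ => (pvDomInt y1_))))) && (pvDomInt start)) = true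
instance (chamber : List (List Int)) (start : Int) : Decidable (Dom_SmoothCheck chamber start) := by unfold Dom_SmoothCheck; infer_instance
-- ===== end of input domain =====

-- B replaces A's mutable 7-flag array and per-row marking loops by a column-major
-- all/any over prefix/suffix all-ones tests (objective: simpler).

-- ===== PORT A =====
-- the inner marking loop 'for i in r: if row[i]==1: check[i]=True else: break';
-- row.getD i 0 is exact (i always in range of row here); check.set is exact under
-- Pre_ (Python raises IndexError on check[i] with i ≥ 7; such inputs are outside Pre_)
def pvMarkRun (row : List Int) : List Nat → List Bool → List Bool
  | [], check => check
  | i :: is, check =>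
      if row.getD i 0 == 1 then pvMarkRun row is (check.set i true) else check

-- one iteration of the outer 'for row in chamber[start:]'; row[0] and row[len(row)-1]
-- via getD (exact for the nonempty rows Pre_ admits)
def pvProcessRow (check : List Bool) (row : List Int) : List Bool :=
  let check1 := if row.getD 0 0 == 1 then pvMarkRun row (List.range row.length) check else check
  if row.getD (row.length - 1) 0 == 1 then
    pvMarkRun row (List.range row.length).reverse check1
  else check1

def SmoothCheck (chamber : List (List Int)) (start : Int) : Bool :=
  let check := [false, false, false, false, false, false, false]
  let check := (PySem.List.slice chamber (some start) none).foldl pvProcessRow check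
  -- 'for c in check: if not c: return False / else: return True'
  check.all (fun c => c)

-- ===== PORT B =====
-- body of B's 'any(...)': j < len(row) and (all of row[:j+1] == 1 or all of row[j:] == 1)
def pvCover (row : List Int) (j : Nat) : Bool :=
  decide (j < row.length) &&
    ((row.take (j + 1)).all (fun x => x == 1) || (row.drop j).all (fun x => x == 1))

def SmoothCheck_alt (chamber : List (List Int)) (start : Int) : Bool :=
  let rows := PySem.List.slice chamber (some start) none
  (List.range 7).all (fun j => rows.any (fun row => pvCover row j))

-- ===== PRECONDITION & SPEC =====
-- Pre_ excludes exactly the inputs where A raises IndexError: a row of chamber[start:]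
-- that is empty (row[0]), or wider than 7 with its last entry 1 or its first 8 entries
-- all 1 (check[i] indexed at i ≥ 7).
def Pre_SmoothCheck (chamber : List (List Int)) (start : Int) : Prop :=
  ∀ row ∈ PySem.List.slice chamber (some start) none,
    row ≠ [] ∧ (row.length ≤ 7 ∨
      (row.getLast? ≠ some 1 ∧ ¬ ((row.take 8).all (fun x => x == 1) = true)))
instance (chamber : List (List Int)) (start : Int) : Decidable (Pre_SmoothCheck chamber start) := by
  unfold Pre_SmoothCheck; infer_instance

def pvWitness_SmoothCheck : List (List Int) × Int := ([[1, 1, 1, 1, 1, 1, 1], [0, 1, 0]], 0)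

def Spec_SmoothCheck (chamber : List (List Int)) (start : Int) (out : Bool) : Prop := out = SmoothCheck_alt chamber start
instance (chamber : List (List Int)) (start : Int) (out : Bool) : Decidable (Spec_SmoothCheck chamber start out) := by unfold Spec_SmoothCheck; infer_instance

-- ===== CLAIM (what is proved, stated in full; the proofs are below) =====
def Claim_equal_SmoothCheck : Prop := ∀ (chamber : List (List Int)) (start : Int), Dom_SmoothCheck chamber start → Pre_SmoothCheck chamber start → Spec_SmoothCheck chamber start (SmoothCheck chamber start)

-- ===== LEMMAS AND PROOFS =====

theorem pv_getD_set_true (c : List Bool) (i j : Nat) (hj : j < c.length) :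
    (c.set i true).getD j false = (c.getD j false || decide (j = i)) := by
  by_cases h : j = i
  · subst h
    simp [List.getD, List.getElem?_set_self (by omega : j < c.length)]
  · simp [List.getD, List.getElem?_set_ne (fun hne => h hne.symm), h]

theorem pv_markRun_length (row : List Int) (is : List Nat) (c : List Bool) :
    (pvMarkRun row is c).length = c.length := by
  induction is generalizing c with
  | nil => simp [pvMarkRun]
  | cons i is ih =>
      simp only [pvMarkRun]
      split
      · rw [ih]; simp
      · rfl

theorem pv_markRun_getD (row : List Int) (is : List Nat) (c : List Bool) (j : Nat)
    (hj : j < c.length) :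
    (pvMarkRun row is c).getD j false =
      (c.getD j false || decide (j ∈ is.takeWhile (fun i => row.getD i 0 == 1))) := by
  induction is generalizing c with
  | nil => simp [pvMarkRun]
  | cons i is ih =>
      by_cases h : (row.getD i 0 == 1) = true
      · rw [show pvMarkRun row (i :: is) c = pvMarkRun row is (c.set i true) by
            simp only [pvMarkRun]; rw [if_pos h],
          List.takeWhile_cons_of_pos (p := fun i => row.getD i 0 == 1) h,
          ih (c.set i true) (by simpa using hj),
          pv_getD_set_true c i j hj]
        simp only [List.mem_cons]
        by_cases hji : j = i <;> simp [hji]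
      · rw [show pvMarkRun row (i :: is) c = c by simp only [pvMarkRun]; rw [if_neg h],
          List.takeWhile_cons_of_neg (p := fun i => row.getD i 0 == 1) h]
        simp

theorem pv_processRow_length (c : List Bool) (row : List Int) :
    (pvProcessRow c row).length = c.length := by
  unfold pvProcessRow
  split <;> split <;> simp [pv_markRun_length]

theorem pv_mem_takeWhile_range' (p : Nat → Bool) (n : Nat) :
    ∀ s j, j ∈ (List.range' s n).takeWhile p ↔
      s ≤ j ∧ j < s + n ∧ ∀ k, s ≤ k → k ≤ j → p k = true := by
  induction n with
  | zero => intro s j; simp; omega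
  | succ n ih =>
      intro s j
      rw [List.range'_succ]
      by_cases h : p s = true
      · rw [List.takeWhile_cons_of_pos h]
        simp only [List.mem_cons, ih (s + 1) j]
        constructor
        · rintro (h0 | ⟨h1, h2, h3⟩)
          · exact ⟨by omega, by omega, fun k hk1 hk2 => by
              have hks : k = s := by omega
              simpa [hks] using h⟩
          · exact ⟨by omega, by omega, fun k hk1 hk2 => by
              by_cases hks : k = s
              · simpa [hks] using h
              · exact h3 k (by omega) hk2⟩
        · rintro ⟨h1, h2, h3⟩
          by_cases hjs : j = s
          · exact Or.inl hjs
          · exact Or.inr ⟨by omega, by omega, fun k hk1 hk2 => h3 k (by omega) hk2⟩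
      · rw [List.takeWhile_cons_of_neg h]
        simp only [List.not_mem_nil, false_iff]
        rintro ⟨h1, h2, h3⟩
        exact h (h3 s (le_refl _) h1)

theorem pv_mem_takeWhile_range (p : Nat → Bool) (n j : Nat) :
    j ∈ (List.range n).takeWhile p ↔ j < n ∧ ∀ k, k ≤ j → p k = true := by
  rw [List.range_eq_range', pv_mem_takeWhile_range' p n 0 j]
  constructor
  · rintro ⟨_, h2, h3⟩; exact ⟨by omega, fun k hk => h3 k (Nat.zero_le _) hk⟩
  · rintro ⟨h1, h2⟩; exact ⟨Nat.zero_le _, by omega, fun k _ hk => h2 k hk⟩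

theorem pv_mem_takeWhile_rev_range (p : Nat → Bool) (n : Nat) :
    ∀ j, j ∈ ((List.range n).reverse).takeWhile p ↔
      j < n ∧ ∀ k, j ≤ k → k < n → p k = true := by
  induction n with
  | zero => intro j; simp
  | succ n ih =>
      intro j
      rw [List.range_succ, List.reverse_append, List.reverse_singleton,
        List.singleton_append]
      by_cases h : p n = true
      · rw [List.takeWhile_cons_of_pos h]
        simp only [List.mem_cons, ih j]
        constructor
        · rintro (h0 | ⟨h1, h2⟩)
          · exact ⟨by omega, fun k hk1 hk2 => by
              have hkn : k = n := by omega
              simpa [hkn] using h⟩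
          · exact ⟨by omega, fun k hk1 hk2 => by
              by_cases hkn : k = n
              · simpa [hkn] using h
              · exact h2 k hk1 (by omega)⟩
        · rintro ⟨h1, h2⟩
          by_cases hjn : j = n
          · exact Or.inl hjn
          · exact Or.inr ⟨by omega, fun k hk1 hk2 => h2 k hk1 (by omega)⟩
      · rw [List.takeWhile_cons_of_neg h]
        simp only [List.not_mem_nil, false_iff]
        rintro ⟨h1, h2⟩
        exact h (h2 n (by omega) (by omega))

theorem pv_take_all_iff (row : List Int) (j : Nat) (hj : j < row.length) :
    (row.take (j + 1)).all (fun x => x == 1) = true ↔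
      ∀ k, k ≤ j → (row.getD k 0 == 1) = true := by
  simp only [List.all_eq_true]
  constructor
  · intro h k hk
    have hk' : k < row.length := by omega
    rw [List.getD_eq_getElem row 0 hk']
    exact h row[k] (by
      rw [List.mem_take_iff_getElem]
      exact ⟨k, by omega, rfl⟩)
  · intro h x hx
    rw [List.mem_take_iff_getElem] at hx
    obtain ⟨k, hk, rfl⟩ := hx
    have hk' : k < row.length := by omega
    have := h k (by omega)
    rwa [List.getD_eq_getElem row 0 hk'] at this
  
theorem pv_drop_all_iff (row : List Int) (j : Nat) :
    (row.drop j).all (fun x => x == 1) = true ↔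
      ∀ k, j ≤ k → k < row.length → (row.getD k 0 == 1) = true := by
  simp only [List.all_eq_true]
  constructor
  · intro h k hk1 hk2
    rw [List.getD_eq_getElem row 0 hk2]
    exact h row[k] (by
      rw [List.mem_iff_getElem]
      exact ⟨k - j, by simp; omega, by rw [List.getElem_drop]; congr 1; omega⟩)
  · intro h x hx
    rw [List.mem_iff_getElem] at hx
    obtain ⟨i, hi, rfl⟩ := hx
    rw [List.getElem_drop]
    have hlt : j + i < row.length := by simp at hi; omega
    have := h (j + i) (by omega) hlt
    rwa [List.getD_eq_getElem row 0 hlt] at this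

theorem pv_processRow_getD (c : List Bool) (row : List Int) (j : Nat) (hj : j < c.length) :
    (pvProcessRow c row).getD j false = (c.getD j false || pvCover row j) := by
  unfold pvProcessRow
  -- abbreviations
  set p : Nat → Bool := fun i => row.getD i 0 == 1 with hp
  have tw1 : decide (j ∈ (List.range row.length).takeWhile p) =
      (decide (j < row.length) && (row.take (j + 1)).all (fun x => x == 1)) := by
    rcases Bool.eq_false_or_eq_true (decide (j < row.length)) with hlt | hlt
    · have hltn : j < row.length := by simpa using hlt
      rw [hlt, Bool.true_and]
      rcases Bool.eq_false_or_eq_true ((row.take (j + 1)).all (fun x => x == 1)) with ha | ha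
      · rw [ha]
        simp only [decide_eq_true_eq]
        rw [pv_mem_takeWhile_range]
        exact ⟨hltn, (pv_take_all_iff row j hltn).mp ha⟩
      · rw [ha]
        simp only [decide_eq_false_iff_not]
        rw [pv_mem_takeWhile_range]
        rintro ⟨_, h2⟩
        rw [Bool.eq_false_iff] at ha
        exact ha ((pv_take_all_iff row j hltn).mpr h2)
    · have hge : ¬ j < row.length := by simpa using hlt
      rw [hlt]
      simp only [Bool.false_and, decide_eq_false_iff_not]
      rw [pv_mem_takeWhile_range]
      rintro ⟨h1, _⟩; exact hge h1
  have tw2 : decide (j ∈ ((List.range row.length).reverse).takeWhile p) =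
      (decide (j < row.length) && (row.drop j).all (fun x => x == 1)) := by
    rcases Bool.eq_false_or_eq_true (decide (j < row.length)) with hlt | hlt
    · have hltn : j < row.length := by simpa using hlt
      rw [hlt, Bool.true_and]
      rcases Bool.eq_false_or_eq_true ((row.drop j).all (fun x => x == 1)) with ha | ha
      · rw [ha]
        simp only [decide_eq_true_eq]
        rw [pv_mem_takeWhile_rev_range]
        exact ⟨hltn, (pv_drop_all_iff row j).mp ha⟩
      · rw [ha]
        simp only [decide_eq_false_iff_not]
        rw [pv_mem_takeWhile_rev_range]
        rintro ⟨_, h2⟩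
        rw [Bool.eq_false_iff] at ha
        exact ha ((pv_drop_all_iff row j).mpr (fun k hk1 hk2 => h2 k hk1 hk2))
    · have hge : ¬ j < row.length := by simpa using hlt
      rw [hlt]
      simp only [Bool.false_and, decide_eq_false_iff_not]
      rw [pv_mem_takeWhile_rev_range]
      rintro ⟨h1, _⟩; exact hge h1
  -- guard implications
  have g1 : decide (j ∈ (List.range row.length).takeWhile p) = true → p 0 = true := by
    intro h
    rw [decide_eq_true_eq, pv_mem_takeWhile_range] at h
    exact h.2 0 (Nat.zero_le _)
  have g2 : decide (j ∈ ((List.range row.length).reverse).takeWhile p) = true →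
      p (row.length - 1) = true := by
    intro h
    rw [decide_eq_true_eq, pv_mem_takeWhile_rev_range] at h
    exact h.2 (row.length - 1) (by omega) (by omega)
  by_cases hA : p 0 = true
  · rw [if_pos hA]
    have hlen1 : (pvMarkRun row (List.range row.length) c).length = c.length :=
      pv_markRun_length _ _ _
    by_cases hB : p (row.length - 1) = true
    · rw [if_pos hB]
      rw [pv_markRun_getD _ _ _ _ (by rw [hlen1]; exact hj),
        pv_markRun_getD _ _ _ _ hj, tw1, tw2, pvCover]
      cases c.getD j false <;> cases decide (j < row.length) <;>
        cases (row.take (j + 1)).all (fun x => x == 1) <;>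
        cases (row.drop j).all (fun x => x == 1) <;> simp
    · rw [if_neg hB]
      rw [pv_markRun_getD _ _ _ _ hj, tw1, pvCover]
      have h2f : (decide (j < row.length) && (row.drop j).all (fun x => x == 1)) = false := by
        rcases Bool.eq_false_or_eq_true (decide (j < row.length) && (row.drop j).all (fun x => x == 1)) with h | h
        · exfalso; apply hB; apply g2; rw [tw2]; exact h
        · exact h
      rw [Bool.and_or_distrib_left, h2f, Bool.or_false]
  · rw [if_neg hA]
    have h1f : (decide (j < row.length) && (row.take (j + 1)).all (fun x => x == 1)) = false := by
      rcases Bool.eq_false_or_eq_true (decide (j < row.length) && (row.take (j + 1)).all (fun x => x == 1)) with h | h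
      · exfalso; apply hA; apply g1; rw [tw1]; exact h
      · exact h
    by_cases hB : p (row.length - 1) = true
    · rw [if_pos hB]
      rw [pv_markRun_getD _ _ _ _ hj, tw2, pvCover]
      rw [Bool.and_or_distrib_left, h1f, Bool.false_or]
    · rw [if_neg hB]
      have h2f : (decide (j < row.length) && (row.drop j).all (fun x => x == 1)) = false := by
        rcases Bool.eq_false_or_eq_true (decide (j < row.length) && (row.drop j).all (fun x => x == 1)) with h | h
        · exfalso; apply hB; apply g2; rw [tw2]; exact h
        · exact h
      rw [pvCover, Bool.and_or_distrib_left, h1f, h2f]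
      simp

theorem pv_foldl_length (rows : List (List Int)) (c : List Bool) :
    (rows.foldl pvProcessRow c).length = c.length := by
  induction rows generalizing c with
  | nil => rfl
  | cons r rs ih => rw [List.foldl_cons, ih, pv_processRow_length]

theorem pv_foldl_getD (rows : List (List Int)) (c : List Bool) (j : Nat) (hj : j < c.length) :
    (rows.foldl pvProcessRow c).getD j false =
      (c.getD j false || rows.any (fun row => pvCover row j)) := by
  induction rows generalizing c with
  | nil => simp
  | cons r rs ih =>
      rw [List.foldl_cons, ih _ (by rw [pv_processRow_length]; exact hj),
        pv_processRow_getD c r j hj, List.any_cons, Bool.or_assoc]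

theorem pv_all_getD (c : List Bool) :
    c.all (fun x => x) = (List.range c.length).all (fun j => c.getD j false) := by
  rw [Bool.eq_iff_iff]
  simp only [List.all_eq_true, List.mem_range]
  constructor
  · intro h j hj
    rw [List.getD_eq_getElem c false hj]
    exact h _ (List.getElem_mem hj)
  · intro h x hx
    rw [List.mem_iff_getElem] at hx
    obtain ⟨i, hi, rfl⟩ := hx
    have := h i hi
    rwa [List.getD_eq_getElem c false hi] at this

-- ===== VERDICT (by name: the statement is the Claim_ definition above) =====
theorem pv_c0_getD (k : Nat) :
    ([false, false, false, false, false, false, false] : List Bool).getD k false = false := by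
  rcases k with _|_|_|_|_|_|_|k <;> simp [List.getD]

theorem SmoothCheck_spec : Claim_equal_SmoothCheck := by
  intro chamber start _ _
  unfold Spec_SmoothCheck SmoothCheck SmoothCheck_alt
  rw [pv_all_getD, pv_foldl_length]
  rw [Bool.eq_iff_iff]
  simp only [List.all_eq_true, List.mem_range, List.length_cons, List.length_nil]
  constructor
  · intro h j hj
    have h2 := h j hj
    rw [pv_foldl_getD _ _ j (by simp only [List.length_cons, List.length_nil]; omega),
      pv_c0_getD j] at h2
    simpa using h2
  · intro h j hj
    rw [pv_foldl_getD _ _ j (by simp only [List.length_cons, List.length_nil]; omega),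
      pv_c0_getD j]
    simpa using h j hj
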